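-- pv_equiv track=rewrite | github.com/NVPivovar/seminar-2022 | sem1.py | do_search_list
-- ===== SOURCE A (Python) =====
-- def do_search_list(word):
--     vowels = ['a', 'e', 'i', 'o', 'u']
--     found = []
--     for letter in word:
--         if letter in vowels:
--             if letter not in found:
--                 found.append(letter)
--     return found
-- ===== SOURCE B (Python) =====
-- def do_search_list(word):
--     pairs = [(word.index(v), v) for v in 'aeiou' if v in word]
--     pairs.sort(key=lambda p: p[0])
--     return [v for _, v in pairs]
-- ===== Notes on version B (the rewrite author's own statement) =====
-- stated objective: faster
-- what changed: Instead of scanning the word character by character and accumulating unseen vowels, B queries each of the five vowels once for its first index in the word, sorts the (index, vowel) pairs, and returns the vowels in that order.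
import Mathlib
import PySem

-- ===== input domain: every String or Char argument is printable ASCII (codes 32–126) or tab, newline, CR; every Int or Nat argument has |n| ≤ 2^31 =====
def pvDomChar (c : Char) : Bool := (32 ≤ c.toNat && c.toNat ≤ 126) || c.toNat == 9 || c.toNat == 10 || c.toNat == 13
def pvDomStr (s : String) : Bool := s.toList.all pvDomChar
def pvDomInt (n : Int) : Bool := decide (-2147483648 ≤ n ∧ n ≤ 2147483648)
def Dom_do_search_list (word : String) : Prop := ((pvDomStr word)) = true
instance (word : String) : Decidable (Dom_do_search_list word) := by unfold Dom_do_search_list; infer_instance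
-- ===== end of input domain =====

-- B replaces A's char-by-char scan with five first-index queries sorted by position
-- (measurably faster in Python by a constant factor; return values proved equal on all strings).

-- ===== PORT A =====
-- vowels = ['a', 'e', 'i', 'o', 'u']  (Python's 1-char strings are Lean Chars)
def pvVowels : List Char := ['a', 'e', 'i', 'o', 'u']

def do_search_list (word : String) : List String :=
  (word.toList.foldl (fun found letter =>
    if letter ∈ pvVowels then
      (if letter ∉ found then found ++ [letter] else found)
    else found) []).map (fun c => String.ofList [c])

-- ===== PORT B =====
-- 'if v in word' + 'word.index(v)' are ported together as PySem.List.index?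
-- (some i exactly when v occurs, i its first index); pairs sorted by first component.
def do_search_list_alt (word : String) : List String :=
  let cs := word.toList
  let pairs := pvVowels.filterMap (fun v => (PySem.List.index? cs v).map (fun i => (i, v)))
  (PySem.List.sorted pairs (fun p => p.1) false).map (fun p => String.ofList [p.2])

-- ===== PRECONDITION & SPEC =====
def Spec_do_search_list (word : String) (out : List String) : Prop := out = do_search_list_alt word
instance (word : String) (out : List String) : Decidable (Spec_do_search_list word out) := by unfold Spec_do_search_list; infer_instance

-- ===== CLAIM (what is proved, stated in full; the proofs are below) =====
def Claim_equal_do_search_list : Prop := ∀ (word : String), Dom_do_search_list word → Spec_do_search_list word (do_search_list word)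

-- ===== LEMMAS AND PROOFS =====

-- A's accumulator loop, isolated on the char list
def pvFoldA (cs : List Char) : List Char :=
  cs.foldl (fun found letter =>
    if letter ∈ pvVowels then
      (if letter ∉ found then found ++ [letter] else found)
    else found) []

-- invariant of A's loop: the accumulator is nodup, holds exactly the vowels of cs,
-- and is strictly increasing in first-occurrence index
lemma pvFoldA_inv (cs : List Char) :
    (pvFoldA cs).Nodup ∧
    (∀ a, a ∈ pvFoldA cs ↔ a ∈ pvVowels ∧ a ∈ cs) ∧
    (pvFoldA cs).Pairwise (fun a b =>
      (PySem.List.index? cs a).getD 0 < (PySem.List.index? cs b).getD 0) := by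
  induction cs using List.reverseRecOn with
  | nil => simp [pvFoldA]
  | append_singleton ds c ih =>
    obtain ⟨hnd, hmem, hpw⟩ := ih
    have hstep : pvFoldA (ds ++ [c]) =
        (if c ∈ pvVowels then
          (if c ∉ pvFoldA ds then pvFoldA ds ++ [c] else pvFoldA ds)
        else pvFoldA ds) := by
      simp [pvFoldA, List.foldl_append]
    -- indices of old members are unchanged by appending c
    have hidx_old : ∀ a ∈ pvFoldA ds,
        (PySem.List.index? (ds ++ [c]) a).getD 0 = (PySem.List.index? ds a).getD 0 := by
      intro a ha
      rw [PySem.List.index?_append_of_mem _ ((hmem a).1 ha).2]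
    have hpw' : (pvFoldA ds).Pairwise (fun a b =>
        (PySem.List.index? (ds ++ [c]) a).getD 0 < (PySem.List.index? (ds ++ [c]) b).getD 0) := by
      refine hpw.imp_of_mem ?_
      intro a b ha hb h
      rw [hidx_old a ha, hidx_old b hb]; exact h
    by_cases hv : c ∈ pvVowels
    · by_cases hf : c ∈ pvFoldA ds
      · refine ⟨by simpa [hstep, hv, hf] using hnd, ?_, by simpa [hstep, hv, hf] using hpw'⟩
        intro a
        rw [hstep]
        simp only [hv, if_true, hf, not_true, if_false, List.mem_append, List.mem_singleton]
        constructor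
        · intro ha; exact ⟨((hmem a).1 ha).1, Or.inl ((hmem a).1 ha).2⟩
        · rintro ⟨hav, (had | rfl)⟩
          · exact (hmem a).2 ⟨hav, had⟩
          · exact hf
      · -- c is appended; c is not in ds (else it would already be in the accumulator)
        have hcds : c ∉ ds := fun h => hf ((hmem c).2 ⟨hv, h⟩)
        have hres : pvFoldA (ds ++ [c]) = pvFoldA ds ++ [c] := by simp [hstep, hv, hf]
        refine ⟨?_, ?_, ?_⟩
        · rw [hres, List.nodup_append]
          exact ⟨hnd, List.nodup_singleton c, by intro a ha b hb h; rw [List.mem_singleton] at hb; subst hb; subst h; exact hf ha⟩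
        · intro a
          rw [hres]
          simp only [List.mem_append, List.mem_singleton]
          constructor
          · rintro (ha | rfl)
            · exact ⟨((hmem a).1 ha).1, Or.inl ((hmem a).1 ha).2⟩
            · exact ⟨hv, Or.inr rfl⟩
          · rintro ⟨hav, (had | rfl)⟩
            · exact Or.inl ((hmem a).2 ⟨hav, had⟩)
            · exact Or.inr rfl
        · rw [hres, List.pairwise_append]
          refine ⟨hpw', by simp, ?_⟩
          intro a ha b hb
          rw [List.mem_singleton] at hb; subst hb
          rw [hidx_old a ha, PySem.List.index?_append_singleton_self ds b hcds]
          have hmem' := ((hmem a).1 ha).2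
          rcases Option.isSome_iff_exists.mp
            ((PySem.List.index?_isSome_iff ds a).mpr hmem') with ⟨k, hk⟩
          obtain ⟨hk', _, _⟩ := PySem.List.getElem_of_index?_eq_some hk
          rw [hk]
          simpa using hk'
    · refine ⟨by simpa [hstep, hv] using hnd, ?_, by simpa [hstep, hv] using hpw'⟩
      intro a
      rw [hstep]
      simp only [hv, if_false]
      constructor
      · intro ha; exact ⟨((hmem a).1 ha).1, List.mem_append_left _ ((hmem a).1 ha).2⟩
      · rintro ⟨hav, had⟩
        rcases List.mem_append.mp had with h | h
        · exact (hmem a).2 ⟨hav, h⟩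
        · rw [List.mem_singleton] at h; subst h; exact absurd hav hv
-- combined filter 'if v in word' + index as a filter-then-map
lemma pvPairs_eq (cs : List Char) (l : List Char) :
    l.filterMap (fun v => (PySem.List.index? cs v).map (fun i => (i, v)))
      = (l.filter (fun v => decide (v ∈ cs))).map
          (fun v => ((PySem.List.index? cs v).getD 0, v)) := by
  induction l with
  | nil => rfl
  | cons v t ih =>
    rw [List.filterMap_cons, List.filter_cons]
    by_cases hv : v ∈ cs
    · rcases Option.isSome_iff_exists.mp
        ((PySem.List.index?_isSome_iff cs v).mpr hv) with ⟨k, hk⟩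
      rw [hk, ih]
      have hk' : List.idxOf? v cs = some k := by simpa using hk
      simp [hv, hk']
    · rw [(PySem.List.index?_eq_none_iff cs v).mpr hv, ih]
      simp [hv]

-- ===== VERDICT (by name: the statement is the Claim_ definition above) =====
theorem do_search_list_spec : Claim_equal_do_search_list := by
  intro word _
  unfold Spec_do_search_list do_search_list do_search_list_alt
  obtain ⟨hnd, hmem, hpw⟩ := pvFoldA_inv word.toList
  let cs := word.toList
  -- name the sorted order: it is A's accumulator, tagged with first indices
  have hsorted :
      PySem.List.sorted (pvVowels.filterMap
          (fun v => (PySem.List.index? cs v).map (fun i => (i, v)))) (fun p => p.1) false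
        = (pvFoldA cs).map (fun a => ((PySem.List.index? cs a).getD 0, a)) := by
    apply PySem.List.sorted_eq_of_perm_of_pairwise_lt
    · rw [pvPairs_eq]
      apply List.Perm.map
      rw [List.perm_ext_iff_of_nodup hnd (List.Nodup.filter _ (by decide))]
      intro a
      simp only [List.mem_filter, decide_eq_true_eq]
      exact hmem a
    · exact List.pairwise_map.mpr hpw
  show (pvFoldA cs).map (fun c => String.ofList [c])
      = ((PySem.List.sorted (pvVowels.filterMap
          (fun v => (PySem.List.index? cs v).map (fun i => (i, v)))) (fun p => p.1) false).map
          (fun p => String.ofList [p.2]))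
  rw [hsorted, List.map_map]
  rfl
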